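-- pv_equiv track=rewrite | github.com/sword-tyrant-error404/VPA | connect4_ai.py | _check4
-- ===== SOURCE A (Python) =====
-- def _check4(occupied, x, y, color, dx, dy):
--     for d in (-3, -2, -1, 0):
--         try:
--             if all(
--                 0 <= x+d*dx+i*dx < 7 and
--                 0 <= y+d*dy+i*dy < 6 and
--                 occupied[x+d*dx+i*dx][y+d*dy+i*dy] == color
--                 for i in range(4)
--             ):
--                 return True
--         except IndexError:
--             pass
--     return False
-- ===== SOURCE B (Python) =====
-- def _check4(occupied, x, y, color, dx, dy):
--     def ok(i, j):
--         return (0 <= i < 7 and 0 <= j < 6 and i < len(occupied)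
--                 and j < len(occupied[i]) and occupied[i][j] == color)
--
--     def walk(steps, cx, cy, ddx, ddy):
--         if steps == 0:
--             return 0
--         if ok(cx + ddx, cy + ddy):
--             return walk(steps - 1, cx + ddx, cy + ddy, ddx, ddy) + 1
--         return 0
--
--     if not ok(x, y):
--         return False
--     return 1 + walk(3, x, y, dx, dy) + walk(3, x, y, -dx, -dy) >= 4
-- ===== Notes on version B (the rewrite author's own statement) =====
-- stated objective: alternative
-- what changed: A scans four fixed length-4 windows through (x,y) (up to 16 cell tests); B tests (x,y) once and walks outward along +(dx,dy) and -(dx,dy) counting consecutive same-color in-bounds cells (capped at 3 each way), returning True iff 1+forward+backward >= 4.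
import Mathlib
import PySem

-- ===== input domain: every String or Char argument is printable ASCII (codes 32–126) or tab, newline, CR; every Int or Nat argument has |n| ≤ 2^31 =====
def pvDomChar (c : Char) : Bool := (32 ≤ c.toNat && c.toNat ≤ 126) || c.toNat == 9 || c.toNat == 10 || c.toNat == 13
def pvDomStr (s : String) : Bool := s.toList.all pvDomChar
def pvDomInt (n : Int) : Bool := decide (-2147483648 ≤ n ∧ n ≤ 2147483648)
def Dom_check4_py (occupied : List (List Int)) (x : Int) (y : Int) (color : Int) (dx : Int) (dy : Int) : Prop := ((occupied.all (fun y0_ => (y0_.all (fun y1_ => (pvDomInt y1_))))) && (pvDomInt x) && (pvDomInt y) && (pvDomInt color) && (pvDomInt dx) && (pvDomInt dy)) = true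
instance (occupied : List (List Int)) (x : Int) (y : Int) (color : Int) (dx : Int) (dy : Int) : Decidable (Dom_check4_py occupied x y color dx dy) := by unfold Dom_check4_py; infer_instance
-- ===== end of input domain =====

-- B replaces A's four fixed length-4 window scans by one occupancy test at (x,y) plus two
-- capped outward walks (forward and backward along (dx,dy)); objective: alternative decomposition.

-- ===== PORT A =====
-- per-i conjunct of A's generator: bounds check, then two indexings (none = IndexError), then == color
def pvCellA (occupied : List (List Int)) (color : Int) (i j : Int) : Option Bool :=
  if 0 ≤ i ∧ i < 7 ∧ 0 ≤ j ∧ j < 6 then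
    match PySem.List.pyGet? occupied i with
    | none => none
    | some row =>
      match PySem.List.pyGet? row j with
      | none => none
      | some v => some (v == color)
  else some false

-- all(... for i in range(4)) under try/except: none = IndexError escaped from all()
def pvWinA (occupied : List (List Int)) (x y color dx dy d : Int) : List Int → Option Bool
  | [] => some true
  | i :: rest =>
    match pvCellA occupied color (x + d*dx + i*dx) (y + d*dy + i*dy) with
    | none => none
    | some false => some false
    | some true => pvWinA occupied x y color dx dy d rest

-- for d in (-3,-2,-1,0): True window returns True; False or IndexError continues
def pvLoopA (occupied : List (List Int)) (x y color dx dy : Int) : List Int → Bool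
  | [] => false
  | d :: rest =>
    match pvWinA occupied x y color dx dy d [0, 1, 2, 3] with
    | some true => true
    | _ => pvLoopA occupied x y color dx dy rest

def check4_py (occupied : List (List Int)) (x : Int) (y : Int) (color : Int) (dx : Int) (dy : Int) : Bool :=
  pvLoopA occupied x y color dx dy [-3, -2, -1, 0]

-- ===== PORT B =====
-- B's ok(i, j): in the 7×6 board, inside the actual lists, and equal to color
def pvOkB (occupied : List (List Int)) (color : Int) (i j : Int) : Bool :=
  decide (0 ≤ i) && decide (i < 7) && decide (0 ≤ j) && decide (j < 6) &&
  decide (i < (occupied.length : Int)) &&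
  (match PySem.List.pyGet? occupied i with
   | none => false
   | some row =>
     decide (j < (row.length : Int)) &&
     (match PySem.List.pyGet? row j with
      | none => false
      | some v => v == color))

-- B's walk(steps, cx, cy, ddx, ddy)
def pvWalkB (occupied : List (List Int)) (color ddx ddy : Int) : Nat → Int → Int → Nat
  | 0, _, _ => 0
  | n + 1, cx, cy =>
    if pvOkB occupied color (cx + ddx) (cy + ddy) then
      pvWalkB occupied color ddx ddy n (cx + ddx) (cy + ddy) + 1
    else 0

def check4_py_alt (occupied : List (List Int)) (x : Int) (y : Int) (color : Int) (dx : Int) (dy : Int) : Bool :=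
  if pvOkB occupied color x y then
    decide (1 + (pvWalkB occupied color dx dy 3 x y : Int) + (pvWalkB occupied color (-dx) (-dy) 3 x y : Int) ≥ 4)
  else false

-- ===== PRECONDITION & SPEC =====
def Spec_check4_py (occupied : List (List Int)) (x : Int) (y : Int) (color : Int) (dx : Int) (dy : Int) (out : Bool) : Prop := out = check4_py_alt occupied x y color dx dy
instance (occupied : List (List Int)) (x : Int) (y : Int) (color : Int) (dx : Int) (dy : Int) (out : Bool) : Decidable (Spec_check4_py occupied x y color dx dy out) := by unfold Spec_check4_py; infer_instance

-- ===== CLAIM (what is proved, stated in full; the proofs are below) =====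
def Claim_equal_check4_py : Prop := ∀ (occupied : List (List Int)) (x : Int) (y : Int) (color : Int) (dx : Int) (dy : Int), Dom_check4_py occupied x y color dx dy → Spec_check4_py occupied x y color dx dy (check4_py occupied x y color dx dy)

-- ===== LEMMAS AND PROOFS =====

-- A's per-cell outcome 'some true' coincides with B's ok-test
theorem pvCellA_true_iff (occupied : List (List Int)) (color i j : Int) :
    pvCellA occupied color i j = some true ↔ pvOkB occupied color i j = true := by
  unfold pvCellA pvOkB
  split_ifs with h
  · rcases h with ⟨h0, h7, h0', h6⟩
    cases hrow : PySem.List.pyGet? occupied i with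
    | none => simp
    | some row =>
      have hi : i < (occupied.length : Int) := by
        have := PySem.List.pyGet?_eq_none_iff (xs := occupied) (i := i)
        by_contra hni
        have : PySem.List.pyGet? occupied i = none := by
          rw [PySem.List.pyGet?_eq_none_iff]
          intro hin
          rcases hin with ⟨_, hlt⟩
          omega
        simp [this] at hrow
      cases hv : PySem.List.pyGet? row j with
      | none => simp [hv]
      | some v =>
        have hj : j < (row.length : Int) := by
          by_contra hnj
          have : PySem.List.pyGet? row j = none := by
            rw [PySem.List.pyGet?_eq_none_iff]
            intro hin
            rcases hin with ⟨_, hlt⟩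
            omega
          simp [this] at hv
        simp [hv, h0, h7, h0', h6, hi, hj]
  · constructor
    · intro hc; simp at hc
    · intro hb
      exfalso
      simp only [Bool.and_eq_true, decide_eq_true_eq] at hb
      exact h ⟨hb.1.1.1.1.1, hb.1.1.1.1.2, hb.1.1.1.2, hb.1.1.2⟩

theorem pvWinA_cons (occupied : List (List Int)) (x y color dx dy d i : Int) (rest : List Int) :
    (pvWinA occupied x y color dx dy d (i :: rest) = some true) ↔
      (pvOkB occupied color (x + d*dx + i*dx) (y + d*dy + i*dy) = true ∧
        pvWinA occupied x y color dx dy d rest = some true) := by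
  rw [← pvCellA_true_iff]
  conv_lhs => rw [pvWinA]
  cases hc : pvCellA occupied color (x + d*dx + i*dx) (y + d*dy + i*dy) with
  | none => simp [hc]
  | some b => cases b <;> simp [hc]

-- the window starting at offset d is all-ok iff the four cells at offsets d,d+1,d+2,d+3 are ok
theorem pvWinA_eval (occupied : List (List Int)) (x y color dx dy d : Int) :
    (pvWinA occupied x y color dx dy d [0, 1, 2, 3] = some true) ↔
      (pvOkB occupied color (x + d*dx) (y + d*dy) = true ∧
       pvOkB occupied color (x + (d+1)*dx) (y + (d+1)*dy) = true ∧
       pvOkB occupied color (x + (d+2)*dx) (y + (d+2)*dy) = true ∧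
       pvOkB occupied color (x + (d+3)*dx) (y + (d+3)*dy) = true) := by
  rw [pvWinA_cons, pvWinA_cons, pvWinA_cons, pvWinA_cons]
  have e0 : x + d*dx + 0*dx = x + d*dx := by ring
  have e0' : y + d*dy + 0*dy = y + d*dy := by ring
  have e1 : x + d*dx + 1*dx = x + (d+1)*dx := by ring
  have e1' : y + d*dy + 1*dy = y + (d+1)*dy := by ring
  have e2 : x + d*dx + 2*dx = x + (d+2)*dx := by ring
  have e2' : y + d*dy + 2*dy = y + (d+2)*dy := by ring
  have e3 : x + d*dx + 3*dx = x + (d+3)*dx := by ring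
  have e3' : y + d*dy + 3*dy = y + (d+3)*dy := by ring
  rw [e0, e0', e1, e1', e2, e2', e3, e3']
  simp [pvWinA]

-- combinatorial core: four-windows disjunction vs centre + two capped walks, over 7 booleans
theorem pvKey (m3 m2 m1 c0 p1 p2 p3 : Bool) :
    ((m3 && m2 && m1 && c0) || ((m2 && m1 && c0 && p1) || ((m1 && c0 && p1 && p2) || (c0 && p1 && p2 && p3)))) =
      (if c0 then
        decide ((1 : Int) + ((if p1 then (if p2 then (if p3 then (3:Nat) else 2) else 1) else 0 : Nat) : Int) +
          ((if m1 then (if m2 then (if m3 then (3:Nat) else 2) else 1) else 0 : Nat) : Int) ≥ 4)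
      else false) := by
  cases m3 <;> cases m2 <;> cases m1 <;> cases c0 <;> cases p1 <;> cases p2 <;> cases p3 <;> decide

-- the loop over the four start offsets is an 'any'
theorem pvLoopA_any (occupied : List (List Int)) (x y color dx dy : Int) (L : List Int) :
    pvLoopA occupied x y color dx dy L =
      L.any (fun d => pvWinA occupied x y color dx dy d [0, 1, 2, 3] == some true) := by
  induction L with
  | nil => rfl
  | cons d rest ih =>
    unfold pvLoopA
    cases h : pvWinA occupied x y color dx dy d [0, 1, 2, 3] with
    | none => simp [h, ih]
    | some b => cases b <;> simp [h, ih]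

-- B's walk evaluates to the capped count of consecutive ok cells
theorem pvWalkB_eval (occupied : List (List Int)) (color ddx ddy cx cy : Int) :
    pvWalkB occupied color ddx ddy 3 cx cy =
      (if pvOkB occupied color (cx + 1*ddx) (cy + 1*ddy) then
        (if pvOkB occupied color (cx + 2*ddx) (cy + 2*ddy) then
          (if pvOkB occupied color (cx + 3*ddx) (cy + 3*ddy) then 3 else 2)
        else 1)
      else 0) := by
  have e1 : cx + ddx = cx + 1*ddx := by ring
  have e1' : cy + ddy = cy + 1*ddy := by ring
  have e2 : cx + 1*ddx + ddx = cx + 2*ddx := by ring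
  have e2' : cy + 1*ddy + ddy = cy + 2*ddy := by ring
  have e3 : cx + 2*ddx + ddx = cx + 3*ddx := by ring
  have e3' : cy + 2*ddy + ddy = cy + 3*ddy := by ring
  simp only [pvWalkB, e1, e1', e2, e2', e3, e3']
  split_ifs <;> rfl

-- ===== VERDICT (by name: the statement is the Claim_ definition above) =====
theorem check4_py_spec : Claim_equal_check4_py := by
  intro occupied x y color dx dy _
  unfold Spec_check4_py
  set C : Int → Bool := fun k => pvOkB occupied color (x + k*dx) (y + k*dy) with hC
  have hW : ∀ d : Int, (pvWinA occupied x y color dx dy d [0, 1, 2, 3] == some true) =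
      (C d && C (d+1) && C (d+2) && C (d+3)) := by
    intro d
    rw [Bool.eq_iff_iff]
    simp only [beq_iff_eq, Bool.and_eq_true]
    rw [pvWinA_eval]
    simp [hC, and_assoc]
  have hA : check4_py occupied x y color dx dy =
      ((C (-3) && C (-2) && C (-1) && C 0) ||
       ((C (-2) && C (-1) && C 0 && C 1) ||
        ((C (-1) && C 0 && C 1 && C 2) || (C 0 && C 1 && C 2 && C 3)))) := by
    unfold check4_py
    rw [pvLoopA_any]
    simp only [List.any_cons, List.any_nil, hW, Bool.or_false]
    norm_num
  have hF := pvWalkB_eval occupied color dx dy x y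
  have hB := pvWalkB_eval occupied color (-dx) (-dy) x y
  have em1 : x + 1*(-dx) = x + (-1)*dx := by ring
  have em1' : y + 1*(-dy) = y + (-1)*dy := by ring
  have em2 : x + 2*(-dx) = x + (-2)*dx := by ring
  have em2' : y + 2*(-dy) = y + (-2)*dy := by ring
  have em3 : x + 3*(-dx) = x + (-3)*dx := by ring
  have em3' : y + 3*(-dy) = y + (-3)*dy := by ring
  rw [em1, em1', em2, em2', em3, em3'] at hB
  have hAlt : check4_py_alt occupied x y color dx dy =
      (if C 0 then
        decide ((1 : Int) + ((if C 1 then (if C 2 then (if C 3 then (3:Nat) else 2) else 1) else 0 : Nat) : Int) +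
          ((if C (-1) then (if C (-2) then (if C (-3) then (3:Nat) else 2) else 1) else 0 : Nat) : Int) ≥ 4)
      else false) := by
    unfold check4_py_alt
    rw [hF, hB]
    have e0 : x + (0:Int)*dx = x := by ring
    have e0' : y + (0:Int)*dy = y := by ring
    simp only [hC, e0, e0']
  rw [hA, hAlt]
  exact pvKey (C (-3)) (C (-2)) (C (-1)) (C 0) (C 1) (C 2) (C 3)
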